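-- pv_equiv track=rewrite | github.com/thegeek-sys/Vault | Files/recurs.py | create_checkboard
-- ===== SOURCE A (Python) =====
-- def checkboard(k=1):
--     # 2 x 2
--     black = (0,)*3
--     white = (255,)*3
--     # white | black
--     row = [white,]*k + [black,]*k
--     # white | black
--     # black | white
--     return [row,]*k + [row[::-1],]*k
--
-- def create_checkboard(n,k):
--     assert n%2==0, n
--     assert n>=2, 'no checkboard with a single pixel'
--
--     if n == 2:
--         return checkboard(k)
--
--     #
--     rows = create_checkboard(n//2, k)
--     # concateno le righe
--     # x
--     # |
--     # |
--     # x
--     rows = rows*2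
--     # ripeto per orizzontale
--     # x ---- x
--     # |
--     # |
--     # x
--     return [ r*2 for  r in rows]
-- ===== SOURCE B (Python) =====
-- def create_checkboard(n, k):
--     # Bottom-up: build the 2x2-block base board, then double it while halving n.
--     white = (255,) * 3
--     black = (0,) * 3
--     row = [white if j < k else black for j in range(2 * k)]
--     grid = [row if i < k else row[::-1] for i in range(2 * k)]
--     m = n
--     while m > 2:
--         assert m % 2 == 0, m
--         grid = [r * 2 for r in grid * 2]
--         m //= 2
--     assert m == 2, 'no checkboard with a single pixel'
--     return grid
-- ===== Notes on version B (the rewrite author's own statement) =====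
-- stated objective: alternative
-- what changed: Replaces A's top-down recursion (validate, recurse on n//2, double on the way back) by a single bottom-up while loop that validates and doubles in place, with the base board built by index comprehensions over range(2*k) instead of list repetition.
import Mathlib
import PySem

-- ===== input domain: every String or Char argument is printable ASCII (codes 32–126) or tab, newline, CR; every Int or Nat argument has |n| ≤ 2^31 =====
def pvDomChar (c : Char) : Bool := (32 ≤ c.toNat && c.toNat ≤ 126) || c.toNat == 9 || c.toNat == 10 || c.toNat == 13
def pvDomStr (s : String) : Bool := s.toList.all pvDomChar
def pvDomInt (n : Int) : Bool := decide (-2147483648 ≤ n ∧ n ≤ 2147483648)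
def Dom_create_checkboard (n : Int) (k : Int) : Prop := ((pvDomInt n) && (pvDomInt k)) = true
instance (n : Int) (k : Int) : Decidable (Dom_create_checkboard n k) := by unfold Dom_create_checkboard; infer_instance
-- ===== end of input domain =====

-- B replaces A's top-down recursion by one bottom-up doubling loop over the same base board (objective: alternative decomposition; return values only — neither version mutates its arguments).

-- ===== PORT A =====
-- helper checkboard(k): tuple-repetition '(x,)*3' and '[x]*k' are List.replicate (empty for k ≤ 0,
-- exactly Python's list/tuple repetition); 'row[::-1]' is reversal (PySem.List.slice?_none_none_neg_one).
def checkboard (k : Int) : List (List (List Int)) :=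
  let black := List.replicate 3 (0 : Int)
  let white := List.replicate 3 (255 : Int)
  let row := List.replicate k.toNat white ++ List.replicate k.toNat black
  List.replicate k.toNat row ++ List.replicate k.toNat row.reverse

-- the two asserts become the guard (outside it Python raises AssertionError; those inputs are outside Pre_)
def create_checkboard (n : Int) (k : Int) : List (List (List Int)) :=
  if h : PySem.Int.mod n 2 = 0 ∧ 2 ≤ n then
    if n = 2 then checkboard k
    else
      let rows := create_checkboard (PySem.Int.floordiv n 2) k
      let rows2 := rows ++ rows            -- rows = rows*2
      rows2.map (fun r => r ++ r)          -- [r*2 for r in rows]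
  else []
termination_by n.toNat
decreasing_by
  rename_i hne
  have h2 : PySem.Int.floordiv n 2 = n / 2 :=
    PySem.Int.floordiv_eq_ediv_of_pos (by omega)
  rw [h2]; omega

-- ===== PORT B =====
-- the while loop: each iteration asserts evenness, doubles the grid and halves m;
-- the final 'assert m == 2' is the trailing if; assertion failure = AssertionError, outside Pre_.
def bLoop (m : Int) (grid : List (List (List Int))) : List (List (List Int)) :=
  if h : 2 < m then
    if PySem.Int.mod m 2 = 0 then
      bLoop (PySem.Int.floordiv m 2) ((grid ++ grid).map (fun r => r ++ r))
    else []
  else if m = 2 then grid else []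
termination_by m.toNat
decreasing_by
  have h2 : PySem.Int.floordiv m 2 = m / 2 :=
    PySem.Int.floordiv_eq_ediv_of_pos (by omega)
  rw [h2]; omega

-- base board built by list comprehensions over range(2*k)
def create_checkboard_alt (n : Int) (k : Int) : List (List (List Int)) :=
  let white := List.replicate 3 (255 : Int)
  let black := List.replicate 3 (0 : Int)
  let row := (PySem.List.pyRange 0 (2 * k) 1).map (fun j => if j < k then white else black)
  let grid := (PySem.List.pyRange 0 (2 * k) 1).map (fun i => if i < k then row else row.reverse)
  bLoop n grid

-- ===== PRECONDITION & SPEC =====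
-- A returns exactly on n = 2^e (e ≥ 1): on every other input an assert fires (AssertionError).
-- Stated as the closed form 'n = 2^log2(n)' so that it is decided in O(log n).
def Pre_create_checkboard (n : Int) (k : Int) : Prop := 2 ≤ n ∧ n = 2 ^ (n.toNat).log2
instance (n : Int) (k : Int) : Decidable (Pre_create_checkboard n k) := by
  unfold Pre_create_checkboard; infer_instance
def pvWitness_create_checkboard : Int × Int := (4, 2)

def Spec_create_checkboard (n : Int) (k : Int) (out : List (List (List Int))) : Prop := out = create_checkboard_alt n k
instance (n : Int) (k : Int) (out : List (List (List Int))) : Decidable (Spec_create_checkboard n k out) := by unfold Spec_create_checkboard; infer_instance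

-- ===== CLAIM (what is proved, stated in full; the proofs are below) =====
def Claim_equal_create_checkboard : Prop := ∀ (n : Int) (k : Int), Dom_create_checkboard n k → Pre_create_checkboard n k → Spec_create_checkboard n k (create_checkboard n k)

-- ===== LEMMAS AND PROOFS =====

-- the shared doubling step
def pvDouble (g : List (List (List Int))) : List (List (List Int)) :=
  (g ++ g).map (fun r => r ++ r)

-- comprehension [w if j < k else b for j in range(2*k)] = [w]*k + [b]*k
lemma map_ite_pyRange {α : Type} (k : Int) (w b : α) :
    (PySem.List.pyRange 0 (2 * k) 1).map (fun j => if j < k then w else b)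
      = List.replicate k.toNat w ++ List.replicate k.toNat b := by
  by_cases hk : k ≤ 0
  · rw [PySem.List.pyRange_one_eq_nil (by omega)]
    have : k.toNat = 0 := by omega
    simp [this]
  · rw [PySem.List.pyRange_one_append 0 k (2 * k) (by omega) (by omega)]
    rw [List.map_append]
    congr 1
    · rw [List.map_congr_left (g := fun _ => w)
        (by intro j hj; rw [PySem.List.mem_pyRange_one] at hj; simp [hj.2])]
      rw [List.map_const', PySem.List.length_pyRange_one]
      simp
    · rw [List.map_congr_left (g := fun _ => b)
        (by intro j hj; rw [PySem.List.mem_pyRange_one] at hj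
            have : ¬ j < k := by omega
            simp [this])]
      rw [List.map_const', PySem.List.length_pyRange_one]
      congr 1; omega

lemma two_dvd_pow (e : Nat) (he : 1 ≤ e) : PySem.Int.mod ((2 : Int) ^ e) 2 = 0 := by
  rw [PySem.Int.mod_eq_zero_iff_dvd]
  exact ⟨2 ^ (e - 1), by rw [← pow_succ']; congr 1; omega⟩

lemma floordiv_pow (e : Nat) : PySem.Int.floordiv ((2 : Int) ^ (e + 1)) 2 = 2 ^ e := by
  rw [PySem.Int.floordiv_eq_ediv_of_pos (by omega)]
  rw [pow_succ]
  exact Int.mul_ediv_cancel _ (by omega)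

lemma two_le_pow (e : Nat) (he : 1 ≤ e) : (2 : Int) ≤ 2 ^ e := by
  calc (2 : Int) = 2 ^ 1 := by ring
  _ ≤ 2 ^ e := by apply pow_le_pow_right₀ <;> omega

-- A computes e-1 doublings of the base board
lemma A_pow (e : Nat) (he : 1 ≤ e) (k : Int) :
    create_checkboard (2 ^ e) k = pvDouble^[e - 1] (checkboard k) := by
  induction e with
  | zero => omega
  | succ e ih =>
    rcases Nat.eq_or_lt_of_le he with h1 | h1
    · have : e = 0 := by omega
      subst this
      rw [create_checkboard]
      simp
    · have he1 : 1 ≤ e := by omega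
      rw [create_checkboard]
      rw [dif_pos ⟨two_dvd_pow (e + 1) (by omega), two_le_pow (e + 1) (by omega)⟩]
      rw [if_neg (by have := two_le_pow e he1; intro hc; omega)]
      rw [floordiv_pow, ih he1]
      show pvDouble (pvDouble^[e - 1] (checkboard k)) = pvDouble^[e + 1 - 1] (checkboard k)
      have hh : e + 1 - 1 = (e - 1) + 1 := by omega
      rw [hh, Function.iterate_succ_apply']

-- B's loop computes e-1 doublings of whatever board it is given
lemma B_pow (e : Nat) (he : 1 ≤ e) (g : List (List (List Int))) :
    bLoop (2 ^ e) g = pvDouble^[e - 1] g := by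
  induction e generalizing g with
  | zero => omega
  | succ e ih =>
    rcases Nat.eq_or_lt_of_le he with h1 | h1
    · have : e = 0 := by omega
      subst this
      rw [bLoop]
      norm_num
    · have he1 : 1 ≤ e := by omega
      rw [bLoop]
      rw [dif_pos (show (2 : Int) < 2 ^ (e + 1) by
        have h2 := two_le_pow e he1
        have h3 : (2 : Int) ^ (e + 1) = 2 ^ e * 2 := by ring
        omega)]
      rw [if_pos (two_dvd_pow (e + 1) (by omega))]
      rw [floordiv_pow, ih he1]
      show pvDouble^[e - 1] (pvDouble g) = pvDouble^[e + 1 - 1] g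
      have hh : e + 1 - 1 = (e - 1) + 1 := by omega
      rw [hh, Function.iterate_succ_apply]

-- B's comprehension base board is A's checkboard k
lemma base_eq (k : Int) :
    ((PySem.List.pyRange 0 (2 * k) 1).map
        (fun i => if i < k then
            (PySem.List.pyRange 0 (2 * k) 1).map
              (fun j => if j < k then List.replicate 3 (255 : Int) else List.replicate 3 (0 : Int))
          else ((PySem.List.pyRange 0 (2 * k) 1).map
              (fun j => if j < k then List.replicate 3 (255 : Int) else List.replicate 3 (0 : Int))).reverse))
      = checkboard k := by
  rw [map_ite_pyRange, map_ite_pyRange]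
  rfl

-- ===== VERDICT (by name: the statement is the Claim_ definition above) =====
theorem create_checkboard_spec : Claim_equal_create_checkboard := by
  intro n k _ hpre
  obtain ⟨h2, hn⟩ := hpre
  have he1 : 1 ≤ (n.toNat).log2 := by
    rw [Nat.le_log2 (by omega)]; omega
  set e := (n.toNat).log2 with hedef
  rw [hn]
  show create_checkboard _ k = create_checkboard_alt _ k
  rw [A_pow e he1 k]
  unfold create_checkboard_alt
  rw [B_pow e he1]
  rw [base_eq]
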